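-- pv_equiv track=rewrite | github.com/t4guw/Hackerrank-Web-Scraper | scrape_hackerrank.py | remove_html_escapes
-- ===== SOURCE A (Python) =====
-- def remove_html_escapes(s):
--     html_escapes = (
--         ("'", '&#39;'),
--         ('"', '&quot;'),
--         ('>', '&gt;'),
--         ('<', '&lt;'),
--         ('&', '&amp;')
--     )
--     for code in html_escapes:
--         s = s.replace(code[1], code[0])
--     return s
-- ===== SOURCE B (Python) =====
-- def remove_html_escapes(s):
--     table = {'&#39;': "'", '&quot;': '"', '&gt;': '>', '&lt;': '<', '&amp;': '&'}
--     out = []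
--     i = 0
--     n = len(s)
--     while i < n:
--         if s[i] == '&':
--             for esc, ch in table.items():
--                 if s.startswith(esc, i):
--                     out.append(ch)
--                     i += len(esc)
--                     break
--             else:
--                 out.append('&')
--                 i += 1
--         else:
--             out.append(s[i])
--             i += 1
--     return ''.join(out)
-- ===== Notes on version B (the rewrite author's own statement) =====
-- stated objective: alternative
-- what changed: Replaces A's five sequential full-string replace passes by a single left-to-right scan with an escape table: at each ampersand the scanner matches one of the five escape keys and emits its decoded character, otherwise it copies the character.
import Mathlib
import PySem

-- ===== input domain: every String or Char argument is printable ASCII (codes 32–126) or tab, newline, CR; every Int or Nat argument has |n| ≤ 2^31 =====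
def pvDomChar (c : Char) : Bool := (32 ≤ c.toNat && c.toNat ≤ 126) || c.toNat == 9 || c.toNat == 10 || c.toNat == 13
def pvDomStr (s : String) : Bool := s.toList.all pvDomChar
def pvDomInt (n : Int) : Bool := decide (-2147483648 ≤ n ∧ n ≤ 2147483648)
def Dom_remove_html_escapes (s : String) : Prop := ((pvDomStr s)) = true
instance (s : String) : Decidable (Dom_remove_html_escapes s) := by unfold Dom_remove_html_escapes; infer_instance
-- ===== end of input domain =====

-- B replaces A's five sequential full-string .replace passes by a single left-to-right
-- scan with an escape table (objective: alternative — one pass, no intermediate strings).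

-- ===== PORT A =====
-- literal transliteration: five str.replace passes in A's order
def remove_html_escapes (s : String) : String :=
  let s1 := PySem.Str.replace s "&#39;" "'"
  let s2 := PySem.Str.replace s1 "&quot;" "\""
  let s3 := PySem.Str.replace s2 "&gt;" ">"
  let s4 := PySem.Str.replace s3 "&lt;" "<"
  PySem.Str.replace s4 "&amp;" "&"

-- ===== PORT B =====
-- one left-to-right scan on the character list (Source B's while loop): at '&' try the five
-- escape keys in table order, emit the decoded char and skip the key, else copy the char
def scanEsc : List Char → List Char
  | [] => []
  | c :: t =>
    if c = '&' then
      if List.isPrefixOf ['&','#','3','9',';'] (c :: t) then '\'' :: scanEsc (t.drop 4)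
      else if List.isPrefixOf ['&','q','u','o','t',';'] (c :: t) then '"' :: scanEsc (t.drop 5)
      else if List.isPrefixOf ['&','g','t',';'] (c :: t) then '>' :: scanEsc (t.drop 3)
      else if List.isPrefixOf ['&','l','t',';'] (c :: t) then '<' :: scanEsc (t.drop 3)
      else if List.isPrefixOf ['&','a','m','p',';'] (c :: t) then '&' :: scanEsc (t.drop 4)
      else c :: scanEsc t
    else c :: scanEsc t
termination_by l => l.length
decreasing_by all_goals (simp; try omega)

def remove_html_escapes_alt (s : String) : String :=
  String.ofList (scanEsc s.toList)

-- ===== PRECONDITION & SPEC =====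
def Spec_remove_html_escapes (s : String) (out : String) : Prop := out = remove_html_escapes_alt s
instance (s : String) (out : String) : Decidable (Spec_remove_html_escapes s out) := by unfold Spec_remove_html_escapes; infer_instance

-- ===== CLAIM (what is proved, stated in full; the proofs are below) =====
def Claim_equal_remove_html_escapes : Prop := ∀ (s : String), Dom_remove_html_escapes s → Spec_remove_html_escapes s (remove_html_escapes s)

-- ===== LEMMAS AND PROOFS =====

-- fuel-free model of PySem.Chars.replace (single-pattern left-to-right replace)
def repl1 (old nu : List Char) : List Char → List Char
  | [] => []
  | c :: t =>
    if List.isPrefixOf old (c :: t) then nu ++ repl1 old nu (t.drop (old.length - 1))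
    else c :: repl1 old nu t
termination_by l => l.length
decreasing_by all_goals (simp; try omega)

theorem repl1_nil (old nu : List Char) : repl1 old nu [] = [] := by
  simp [repl1]

theorem repl1_cons_pos (old nu : List Char) (c : Char) (t : List Char)
    (h : List.isPrefixOf old (c :: t)) :
    repl1 old nu (c :: t) = nu ++ repl1 old nu (t.drop (old.length - 1)) := by
  rw [repl1]; simp [h]

theorem repl1_cons_neg (old nu : List Char) (c : Char) (t : List Char)
    (h : ¬ List.isPrefixOf old (c :: t)) :
    repl1 old nu (c :: t) = c :: repl1 old nu t := by
  rw [repl1]; simp [h]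

theorem go_eq (old nu : List Char) (hold : old ≠ []) :
    ∀ fuel t acc, t.length ≤ fuel →
      PySem.Chars.replace.go old nu fuel t acc = acc.reverse ++ repl1 old nu t := by
  intro fuel
  induction fuel with
  | zero =>
    intro t acc h
    have ht : t = [] := by cases t with
      | nil => rfl
      | cons c t => simp at h
    subst ht
    simp [PySem.Chars.replace.go, repl1_nil]
  | succ n ih =>
    intro t acc h
    cases t with
    | nil => simp [PySem.Chars.replace.go, repl1_nil]
    | cons c t =>
      by_cases hp : List.isPrefixOf old (c :: t)
      · obtain ⟨o, os, rfl⟩ : ∃ o os, old = o :: os := by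
          cases old with
          | nil => exact absurd rfl hold
          | cons o os => exact ⟨o, os, rfl⟩
        have hdrop : List.drop (o :: os).length (c :: t) = t.drop ((o :: os).length - 1) := by
          simp
        have hlen : (t.drop ((o :: os).length - 1)).length ≤ n := by
          simp at h ⊢; omega
        simp only [PySem.Chars.replace.go, hp, if_pos]
        rw [hdrop, ih _ _ hlen, repl1_cons_pos _ _ _ _ hp]
        simp
      · have hlen : t.length ≤ n := by simp at h; omega
        simp only [PySem.Chars.replace.go, hp, if_neg, Bool.false_eq_true, not_false_eq_true]
        rw [ih _ _ hlen, repl1_cons_neg _ _ _ _ hp]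
        simp

theorem replace_eq (old nu t : List Char) (hold : old ≠ []) :
    PySem.Chars.replace t old nu = repl1 old nu t := by
  have : old.isEmpty = false := by simp [List.isEmpty_eq_false_iff, hold]
  simp only [PySem.Chars.replace, this, Bool.false_eq_true, if_neg, not_false_eq_true]
  rw [go_eq old nu hold t.length t [] (le_refl _)]
  simp

-- a pattern starting with o is never matched at a head char ≠ o
theorem repl1_step_ne (o : Char) (os nu : List Char) (c : Char) (t : List Char) (hc : c ≠ o) :
    repl1 (o :: os) nu (c :: t) = c :: repl1 (o :: os) nu t := by
  apply repl1_cons_neg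
  intro h
  exact hc ((List.cons_prefix_cons.mp (List.isPrefixOf_iff_prefix.mp h)).1).symm

-- pass-through: a pattern starting with o skips over an o-free segment
theorem repl1_pass (o : Char) (os nu : List Char) (u v : List Char) (hu : o ∉ u) :
    repl1 (o :: os) nu (u ++ v) = u ++ repl1 (o :: os) nu v := by
  induction u with
  | nil => simp
  | cons a u ih =>
    have ha : a ≠ o := by intro h; exact hu (h ▸ List.mem_cons_self)
    have hu' : o ∉ u := fun h => hu (List.mem_cons_of_mem _ h)
    simp only [List.cons_append]
    rw [repl1_step_ne o os nu a _ ha]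
    rw [ih hu']

-- own pattern at the head is consumed
theorem repl1_match (o : Char) (os nu X : List Char) :
    repl1 (o :: os) nu ((o :: os) ++ X) = nu ++ repl1 (o :: os) nu X := by
  have hp : List.isPrefixOf (o :: os) (o :: (os ++ X)) :=
    List.isPrefixOf_iff_prefix.mpr (by simpa using List.prefix_append (o :: os) X)
  simp only [List.cons_append]
  rw [repl1_cons_pos _ _ _ _ hp]
  simp

-- prefix reflection: a prefix avoiding the replacement char r survives repl1 backwards
theorem repl1_reflect (old : List Char) (r : Char) :
    ∀ n t w, t.length ≤ n → r ∉ w → w <+: repl1 old [r] t → w <+: t := by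
  intro n
  induction n with
  | zero =>
    intro t w h hr hp
    have ht : t = [] := by cases t with
      | nil => rfl
      | cons c t => simp at h
    subst ht
    rw [repl1_nil] at hp
    simpa using hp
  | succ n ih =>
    intro t w h hr hp
    cases t with
    | nil => rw [repl1_nil] at hp; simpa using hp
    | cons c t =>
      cases w with
      | nil => exact List.nil_prefix
      | cons a w =>
        by_cases hm : List.isPrefixOf old (c :: t)
        · rw [repl1_cons_pos _ _ _ _ hm] at hp
          have : a = r := (List.cons_prefix_cons.mp hp).1
          exact absurd (this ▸ List.mem_cons_self) hr
        · rw [repl1_cons_neg _ _ _ _ hm] at hp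
          obtain ⟨hac, hw⟩ := List.cons_prefix_cons.mp hp
          have hlen : t.length ≤ n := by simp at h; omega
          have hr' : r ∉ w := fun hmem => hr (List.mem_cons_of_mem _ hmem)
          exact List.cons_prefix_cons.mpr ⟨hac, ih t w hlen hr' hw⟩

-- the five-stage chain of A
def chainA (l : List Char) : List Char :=
  repl1 ['&','a','m','p',';'] ['&']
    (repl1 ['&','l','t',';'] ['<']
      (repl1 ['&','g','t',';'] ['>']
        (repl1 ['&','q','u','o','t',';'] ['"']
          (repl1 ['&','#','3','9',';'] ['\''] l))))

theorem chain_eq_scan : ∀ n l, l.length ≤ n → chainA l = scanEsc l := by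
  intro n
  induction n with
  | zero =>
    intro l h
    have hl : l = [] := by cases l with
      | nil => rfl
      | cons c t => simp at h
    subst hl
    simp [chainA, repl1_nil, scanEsc]
  | succ n ih =>
    intro l h
    cases l with
    | nil => simp [chainA, repl1_nil, scanEsc]
    | cons c t =>
      have hlen : t.length ≤ n := by simp at h; omega
      by_cases hc : c = '&'
      · subst hc
        by_cases h1 : List.isPrefixOf ['&','#','3','9',';'] ('&' :: t)
        · -- &#39;
          obtain ⟨u, hu⟩ : ∃ u, t = ['#','3','9',';'] ++ u := by
            obtain ⟨u, hu⟩ := List.isPrefixOf_iff_prefix.mp h1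
            exact ⟨u, by simpa using hu.symm⟩
          subst hu
          have hul : u.length ≤ n := by simp at hlen; omega
          have e1 : repl1 ['&','#','3','9',';'] ['\''] ('&' :: (['#','3','9',';'] ++ u)) =
              '\'' :: repl1 ['&','#','3','9',';'] ['\''] u := by
            have := repl1_match '&' ['#','3','9',';'] ['\''] u
            simpa using this
          rw [chainA, e1]
          rw [repl1_step_ne _ _ _ _ _ (by decide), repl1_step_ne _ _ _ _ _ (by decide),
              repl1_step_ne _ _ _ _ _ (by decide), repl1_step_ne _ _ _ _ _ (by decide)]
          rw [scanEsc]
          simp only [if_pos rfl, h1, if_pos, List.drop_left]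
          rw [show List.drop 4 (['#','3','9',';'] ++ u) = u by simp, ← ih u hul]
          rfl
        · by_cases h2 : List.isPrefixOf ['&','q','u','o','t',';'] ('&' :: t)
          · -- &quot;
            obtain ⟨u, hu⟩ : ∃ u, t = ['q','u','o','t',';'] ++ u := by
              obtain ⟨u, hu⟩ := List.isPrefixOf_iff_prefix.mp h2
              exact ⟨u, by simpa using hu.symm⟩
            subst hu
            have hul : u.length ≤ n := by simp at hlen; omega
            have e1 : repl1 ['&','#','3','9',';'] ['\''] ('&' :: (['q','u','o','t',';'] ++ u)) =
                '&' :: ['q','u','o','t',';'] ++ repl1 ['&','#','3','9',';'] ['\''] u := by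
              rw [repl1_cons_neg _ _ _ _ (by
                simp [List.isPrefixOf_iff_prefix, List.cons_prefix_cons])]
              rw [repl1_pass '&' _ _ _ _ (by decide)]
              rfl
            have e2 : repl1 ['&','q','u','o','t',';'] ['"']
                (('&' :: ['q','u','o','t',';']) ++ repl1 ['&','#','3','9',';'] ['\''] u) =
                '"' :: repl1 ['&','q','u','o','t',';'] ['"'] (repl1 ['&','#','3','9',';'] ['\''] u) := by
              have := repl1_match '&' ['q','u','o','t',';'] ['"']
                (repl1 ['&','#','3','9',';'] ['\''] u)
              simpa using this
            rw [chainA, e1]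
            rw [show ('&' :: ['q','u','o','t',';'] ++ repl1 ['&','#','3','9',';'] ['\''] u)
                = ('&' :: ['q','u','o','t',';']) ++ repl1 ['&','#','3','9',';'] ['\''] u from rfl, e2]
            rw [repl1_step_ne _ _ _ _ _ (by decide), repl1_step_ne _ _ _ _ _ (by decide),
                repl1_step_ne _ _ _ _ _ (by decide)]
            rw [scanEsc]
            simp only [if_pos rfl, h1, h2, if_neg, if_pos, Bool.false_eq_true, not_false_eq_true,
              List.drop_left]
            rw [show List.drop 5 (['q','u','o','t',';'] ++ u) = u by simp, ← ih u hul]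
            rfl
          · by_cases h3 : List.isPrefixOf ['&','g','t',';'] ('&' :: t)
            · -- &gt;
              obtain ⟨u, hu⟩ : ∃ u, t = ['g','t',';'] ++ u := by
                obtain ⟨u, hu⟩ := List.isPrefixOf_iff_prefix.mp h3
                exact ⟨u, by simpa using hu.symm⟩
              subst hu
              have hul : u.length ≤ n := by simp at hlen; omega
              have e1 : repl1 ['&','#','3','9',';'] ['\''] ('&' :: (['g','t',';'] ++ u)) =
                  ('&' :: ['g','t',';']) ++ repl1 ['&','#','3','9',';'] ['\''] u := by
                rw [repl1_cons_neg _ _ _ _ (by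
                  simp [List.isPrefixOf_iff_prefix, List.cons_prefix_cons])]
                rw [repl1_pass '&' _ _ _ _ (by decide)]
                rfl
              have e2 : repl1 ['&','q','u','o','t',';'] ['"']
                  (('&' :: ['g','t',';']) ++ repl1 ['&','#','3','9',';'] ['\''] u) =
                  ('&' :: ['g','t',';']) ++ repl1 ['&','q','u','o','t',';'] ['"']
                    (repl1 ['&','#','3','9',';'] ['\''] u) := by
                rw [List.cons_append]
                rw [repl1_cons_neg _ _ _ _ (by
                  simp [List.isPrefixOf_iff_prefix, List.cons_prefix_cons])]
                rw [repl1_pass '&' _ _ _ _ (by decide)]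
                rfl
              have e3 : repl1 ['&','g','t',';'] ['>']
                  (('&' :: ['g','t',';']) ++ repl1 ['&','q','u','o','t',';'] ['"']
                    (repl1 ['&','#','3','9',';'] ['\''] u)) =
                  '>' :: repl1 ['&','g','t',';'] ['>'] (repl1 ['&','q','u','o','t',';'] ['"']
                    (repl1 ['&','#','3','9',';'] ['\''] u)) := by
                have := repl1_match '&' ['g','t',';'] ['>']
                  (repl1 ['&','q','u','o','t',';'] ['"'] (repl1 ['&','#','3','9',';'] ['\''] u))
                simpa using this
              rw [chainA, e1, e2, e3]
              rw [repl1_step_ne _ _ _ _ _ (by decide), repl1_step_ne _ _ _ _ _ (by decide)]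
              rw [scanEsc]
              simp only [if_pos rfl, h1, h2, h3, if_neg, if_pos, Bool.false_eq_true,
                not_false_eq_true, List.drop_left]
              rw [show List.drop 3 (['g','t',';'] ++ u) = u by simp, ← ih u hul]
              rfl
            · by_cases h4 : List.isPrefixOf ['&','l','t',';'] ('&' :: t)
              · -- &lt;
                obtain ⟨u, hu⟩ : ∃ u, t = ['l','t',';'] ++ u := by
                  obtain ⟨u, hu⟩ := List.isPrefixOf_iff_prefix.mp h4
                  exact ⟨u, by simpa using hu.symm⟩
                subst hu
                have hul : u.length ≤ n := by simp at hlen; omega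
                have e1 : repl1 ['&','#','3','9',';'] ['\''] ('&' :: (['l','t',';'] ++ u)) =
                    ('&' :: ['l','t',';']) ++ repl1 ['&','#','3','9',';'] ['\''] u := by
                  rw [repl1_cons_neg _ _ _ _ (by
                    simp [List.isPrefixOf_iff_prefix, List.cons_prefix_cons])]
                  rw [repl1_pass '&' _ _ _ _ (by decide)]
                  rfl
                have e2 : repl1 ['&','q','u','o','t',';'] ['"']
                    (('&' :: ['l','t',';']) ++ repl1 ['&','#','3','9',';'] ['\''] u) =
                    ('&' :: ['l','t',';']) ++ repl1 ['&','q','u','o','t',';'] ['"']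
                      (repl1 ['&','#','3','9',';'] ['\''] u) := by
                  rw [List.cons_append]
                  rw [repl1_cons_neg _ _ _ _ (by
                    simp [List.isPrefixOf_iff_prefix, List.cons_prefix_cons])]
                  rw [repl1_pass '&' _ _ _ _ (by decide)]
                  rfl
                have e3 : repl1 ['&','g','t',';'] ['>']
                    (('&' :: ['l','t',';']) ++ repl1 ['&','q','u','o','t',';'] ['"']
                      (repl1 ['&','#','3','9',';'] ['\''] u)) =
                    ('&' :: ['l','t',';']) ++ repl1 ['&','g','t',';'] ['>']
                      (repl1 ['&','q','u','o','t',';'] ['"'] (repl1 ['&','#','3','9',';'] ['\''] u)) := by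
                  rw [List.cons_append]
                  rw [repl1_cons_neg _ _ _ _ (by
                    simp [List.isPrefixOf_iff_prefix, List.cons_prefix_cons])]
                  rw [repl1_pass '&' _ _ _ _ (by decide)]
                  rfl
                have e4 : repl1 ['&','l','t',';'] ['<']
                    (('&' :: ['l','t',';']) ++ repl1 ['&','g','t',';'] ['>']
                      (repl1 ['&','q','u','o','t',';'] ['"'] (repl1 ['&','#','3','9',';'] ['\''] u))) =
                    '<' :: repl1 ['&','l','t',';'] ['<'] (repl1 ['&','g','t',';'] ['>']
                      (repl1 ['&','q','u','o','t',';'] ['"'] (repl1 ['&','#','3','9',';'] ['\''] u))) := by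
                  have := repl1_match '&' ['l','t',';'] ['<']
                    (repl1 ['&','g','t',';'] ['>'] (repl1 ['&','q','u','o','t',';'] ['"']
                      (repl1 ['&','#','3','9',';'] ['\''] u)))
                  simpa using this
                rw [chainA, e1, e2, e3, e4]
                rw [repl1_step_ne _ _ _ _ _ (by decide)]
                rw [scanEsc]
                simp only [if_pos rfl, h1, h2, h3, h4, if_neg, if_pos, Bool.false_eq_true,
                  not_false_eq_true, List.drop_left]
                rw [show List.drop 3 (['l','t',';'] ++ u) = u by simp, ← ih u hul]
                rfl
              · by_cases h5 : List.isPrefixOf ['&','a','m','p',';'] ('&' :: t)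
                · -- &amp;
                  obtain ⟨u, hu⟩ : ∃ u, t = ['a','m','p',';'] ++ u := by
                    obtain ⟨u, hu⟩ := List.isPrefixOf_iff_prefix.mp h5
                    exact ⟨u, by simpa using hu.symm⟩
                  subst hu
                  have hul : u.length ≤ n := by simp at hlen; omega
                  have e1 : repl1 ['&','#','3','9',';'] ['\''] ('&' :: (['a','m','p',';'] ++ u)) =
                      ('&' :: ['a','m','p',';']) ++ repl1 ['&','#','3','9',';'] ['\''] u := by
                    rw [repl1_cons_neg _ _ _ _ (by
                      simp [List.isPrefixOf_iff_prefix, List.cons_prefix_cons])]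
                    rw [repl1_pass '&' _ _ _ _ (by decide)]
                    rfl
                  have e2 : repl1 ['&','q','u','o','t',';'] ['"']
                      (('&' :: ['a','m','p',';']) ++ repl1 ['&','#','3','9',';'] ['\''] u) =
                      ('&' :: ['a','m','p',';']) ++ repl1 ['&','q','u','o','t',';'] ['"']
                        (repl1 ['&','#','3','9',';'] ['\''] u) := by
                    rw [List.cons_append]
                    rw [repl1_cons_neg _ _ _ _ (by
                      simp [List.isPrefixOf_iff_prefix, List.cons_prefix_cons])]
                    rw [repl1_pass '&' _ _ _ _ (by decide)]
                    rfl
                  have e3 : repl1 ['&','g','t',';'] ['>']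
                      (('&' :: ['a','m','p',';']) ++ repl1 ['&','q','u','o','t',';'] ['"']
                        (repl1 ['&','#','3','9',';'] ['\''] u)) =
                      ('&' :: ['a','m','p',';']) ++ repl1 ['&','g','t',';'] ['>']
                        (repl1 ['&','q','u','o','t',';'] ['"'] (repl1 ['&','#','3','9',';'] ['\''] u)) := by
                    rw [List.cons_append]
                    rw [repl1_cons_neg _ _ _ _ (by
                      simp [List.isPrefixOf_iff_prefix, List.cons_prefix_cons])]
                    rw [repl1_pass '&' _ _ _ _ (by decide)]
                    rfl
                  have e4 : repl1 ['&','l','t',';'] ['<']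
                      (('&' :: ['a','m','p',';']) ++ repl1 ['&','g','t',';'] ['>']
                        (repl1 ['&','q','u','o','t',';'] ['"'] (repl1 ['&','#','3','9',';'] ['\''] u))) =
                      ('&' :: ['a','m','p',';']) ++ repl1 ['&','l','t',';'] ['<']
                        (repl1 ['&','g','t',';'] ['>'] (repl1 ['&','q','u','o','t',';'] ['"']
                          (repl1 ['&','#','3','9',';'] ['\''] u))) := by
                    rw [List.cons_append]
                    rw [repl1_cons_neg _ _ _ _ (by
                      simp [List.isPrefixOf_iff_prefix, List.cons_prefix_cons])]
                    rw [repl1_pass '&' _ _ _ _ (by decide)]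
                    rfl
                  have e5 : repl1 ['&','a','m','p',';'] ['&']
                      (('&' :: ['a','m','p',';']) ++ repl1 ['&','l','t',';'] ['<']
                        (repl1 ['&','g','t',';'] ['>'] (repl1 ['&','q','u','o','t',';'] ['"']
                          (repl1 ['&','#','3','9',';'] ['\''] u)))) =
                      '&' :: repl1 ['&','a','m','p',';'] ['&'] (repl1 ['&','l','t',';'] ['<']
                        (repl1 ['&','g','t',';'] ['>'] (repl1 ['&','q','u','o','t',';'] ['"']
                          (repl1 ['&','#','3','9',';'] ['\''] u)))) := by
                    have := repl1_match '&' ['a','m','p',';'] ['&']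
                      (repl1 ['&','l','t',';'] ['<'] (repl1 ['&','g','t',';'] ['>']
                        (repl1 ['&','q','u','o','t',';'] ['"'] (repl1 ['&','#','3','9',';'] ['\''] u))))
                    simpa using this
                  rw [chainA, e1, e2, e3, e4, e5]
                  rw [scanEsc]
                  simp only [if_pos rfl, h1, h2, h3, h4, h5, if_neg, if_pos, Bool.false_eq_true,
                    not_false_eq_true, List.drop_left]
                  rw [show List.drop 4 (['a','m','p',';'] ++ u) = u by simp, ← ih u hul]
                  rfl
                · -- '&' but no escape matches: every stage just copies '&'
                  have e1 : repl1 ['&','#','3','9',';'] ['\''] ('&' :: t) =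
                      '&' :: repl1 ['&','#','3','9',';'] ['\''] t :=
                    repl1_cons_neg _ _ _ _ h1
                  have np2 : ¬ List.isPrefixOf ['&','q','u','o','t',';']
                      ('&' :: repl1 ['&','#','3','9',';'] ['\''] t) := by
                    intro hp
                    apply h2
                    have hw : ['q','u','o','t',';'] <+: repl1 ['&','#','3','9',';'] ['\''] t :=
                      (List.cons_prefix_cons.mp (List.isPrefixOf_iff_prefix.mp hp)).2
                    have := repl1_reflect ['&','#','3','9',';'] '\'' t.length t _ (le_refl _)
                      (by decide) hw
                    exact List.isPrefixOf_iff_prefix.mpr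
                      (List.cons_prefix_cons.mpr ⟨rfl, this⟩)
                  have e2 : repl1 ['&','q','u','o','t',';'] ['"']
                      ('&' :: repl1 ['&','#','3','9',';'] ['\''] t) =
                      '&' :: repl1 ['&','q','u','o','t',';'] ['"']
                        (repl1 ['&','#','3','9',';'] ['\''] t) :=
                    repl1_cons_neg _ _ _ _ np2
                  have np3 : ¬ List.isPrefixOf ['&','g','t',';']
                      ('&' :: repl1 ['&','q','u','o','t',';'] ['"']
                        (repl1 ['&','#','3','9',';'] ['\''] t)) := by
                    intro hp
                    apply h3
                    have hw : ['g','t',';'] <+: repl1 ['&','q','u','o','t',';'] ['"']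
                        (repl1 ['&','#','3','9',';'] ['\''] t) :=
                      (List.cons_prefix_cons.mp (List.isPrefixOf_iff_prefix.mp hp)).2
                    have h6 := repl1_reflect ['&','q','u','o','t',';'] '"' _ _ _ (le_refl _)
                      (by decide) hw
                    have h7 := repl1_reflect ['&','#','3','9',';'] '\'' t.length t _ (le_refl _)
                      (by decide) h6
                    exact List.isPrefixOf_iff_prefix.mpr
                      (List.cons_prefix_cons.mpr ⟨rfl, h7⟩)
                  have e3 : repl1 ['&','g','t',';'] ['>']
                      ('&' :: repl1 ['&','q','u','o','t',';'] ['"']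
                        (repl1 ['&','#','3','9',';'] ['\''] t)) =
                      '&' :: repl1 ['&','g','t',';'] ['>']
                        (repl1 ['&','q','u','o','t',';'] ['"']
                          (repl1 ['&','#','3','9',';'] ['\''] t)) :=
                    repl1_cons_neg _ _ _ _ np3
                  have np4 : ¬ List.isPrefixOf ['&','l','t',';']
                      ('&' :: repl1 ['&','g','t',';'] ['>']
                        (repl1 ['&','q','u','o','t',';'] ['"']
                          (repl1 ['&','#','3','9',';'] ['\''] t))) := by
                    intro hp
                    apply h4
                    have hw : ['l','t',';'] <+: repl1 ['&','g','t',';'] ['>']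
                        (repl1 ['&','q','u','o','t',';'] ['"']
                          (repl1 ['&','#','3','9',';'] ['\''] t)) :=
                      (List.cons_prefix_cons.mp (List.isPrefixOf_iff_prefix.mp hp)).2
                    have h6 := repl1_reflect ['&','g','t',';'] '>' _ _ _ (le_refl _)
                      (by decide) hw
                    have h7 := repl1_reflect ['&','q','u','o','t',';'] '"' _ _ _ (le_refl _)
                      (by decide) h6
                    have h8 := repl1_reflect ['&','#','3','9',';'] '\'' t.length t _ (le_refl _)
                      (by decide) h7
                    exact List.isPrefixOf_iff_prefix.mpr
                      (List.cons_prefix_cons.mpr ⟨rfl, h8⟩)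
                  have e4 : repl1 ['&','l','t',';'] ['<']
                      ('&' :: repl1 ['&','g','t',';'] ['>']
                        (repl1 ['&','q','u','o','t',';'] ['"']
                          (repl1 ['&','#','3','9',';'] ['\''] t))) =
                      '&' :: repl1 ['&','l','t',';'] ['<']
                        (repl1 ['&','g','t',';'] ['>']
                          (repl1 ['&','q','u','o','t',';'] ['"']
                            (repl1 ['&','#','3','9',';'] ['\''] t))) :=
                    repl1_cons_neg _ _ _ _ np4
                  have np5 : ¬ List.isPrefixOf ['&','a','m','p',';']
                      ('&' :: repl1 ['&','l','t',';'] ['<']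
                        (repl1 ['&','g','t',';'] ['>']
                          (repl1 ['&','q','u','o','t',';'] ['"']
                            (repl1 ['&','#','3','9',';'] ['\''] t)))) := by
                    intro hp
                    apply h5
                    have hw : ['a','m','p',';'] <+: repl1 ['&','l','t',';'] ['<']
                        (repl1 ['&','g','t',';'] ['>']
                          (repl1 ['&','q','u','o','t',';'] ['"']
                            (repl1 ['&','#','3','9',';'] ['\''] t))) :=
                      (List.cons_prefix_cons.mp (List.isPrefixOf_iff_prefix.mp hp)).2
                    have h6 := repl1_reflect ['&','l','t',';'] '<' _ _ _ (le_refl _)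
                      (by decide) hw
                    have h7 := repl1_reflect ['&','g','t',';'] '>' _ _ _ (le_refl _)
                      (by decide) h6
                    have h8 := repl1_reflect ['&','q','u','o','t',';'] '"' _ _ _ (le_refl _)
                      (by decide) h7
                    have h9 := repl1_reflect ['&','#','3','9',';'] '\'' t.length t _ (le_refl _)
                      (by decide) h8
                    exact List.isPrefixOf_iff_prefix.mpr
                      (List.cons_prefix_cons.mpr ⟨rfl, h9⟩)
                  have e5 : repl1 ['&','a','m','p',';'] ['&']
                      ('&' :: repl1 ['&','l','t',';'] ['<']
                        (repl1 ['&','g','t',';'] ['>']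
                          (repl1 ['&','q','u','o','t',';'] ['"']
                            (repl1 ['&','#','3','9',';'] ['\''] t)))) =
                      '&' :: repl1 ['&','a','m','p',';'] ['&']
                        (repl1 ['&','l','t',';'] ['<']
                          (repl1 ['&','g','t',';'] ['>']
                            (repl1 ['&','q','u','o','t',';'] ['"']
                              (repl1 ['&','#','3','9',';'] ['\''] t)))) :=
                    repl1_cons_neg _ _ _ _ np5
                  rw [chainA, e1, e2, e3, e4, e5]
                  rw [scanEsc]
                  simp only [if_pos rfl, h1, h2, h3, h4, h5, if_neg, Bool.false_eq_true,
                    not_false_eq_true]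
                  rw [← ih t hlen]
                  rfl
      · -- head is not '&': every stage copies it
        have e1 := repl1_step_ne '&' ['#','3','9',';'] ['\''] c t hc
        rw [chainA, e1]
        rw [repl1_step_ne _ _ _ _ _ hc, repl1_step_ne _ _ _ _ _ hc,
            repl1_step_ne _ _ _ _ _ hc, repl1_step_ne _ _ _ _ _ hc]
        rw [scanEsc]
        simp only [hc, if_neg, not_false_eq_true]
        rw [← ih t hlen]
        rfl

theorem portA_eq_chain (s : String) :
    remove_html_escapes s = String.ofList (chainA s.toList) := by
  simp only [remove_html_escapes, PySem.Str.replace, String.toList_ofList, chainA]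
  rw [replace_eq _ _ _ (by decide), replace_eq _ _ _ (by decide),
      replace_eq _ _ _ (by decide), replace_eq _ _ _ (by decide),
      replace_eq _ _ _ (by decide)]
  rfl

-- ===== VERDICT (by name: the statement is the Claim_ definition above) =====
theorem remove_html_escapes_spec : Claim_equal_remove_html_escapes := by
  intro s _
  unfold Spec_remove_html_escapes remove_html_escapes_alt
  rw [portA_eq_chain, chain_eq_scan s.toList.length s.toList (le_refl _)]
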